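-- pv_equiv track=rewrite | github.com/michaelanieves/Rigging | grp_wName.py | add_offsetGrp_suffix
-- ===== SOURCE A (Python) =====
-- def add_offsetGrp_suffix( name ):
--     suffixes = ['_GEO', '_FOL', '_IOM', '_INF', '_GRP', '_REF', '_BSP', '_BLD', '_CRV', '_JNT', '_LOC']
--     grp_suffix = '_GRP'
--     name_changed = False
--     for suffix in suffixes:
--         if suffix in name:
--             name = name.replace( suffix, grp_suffix )
--             name_changed = True
--     if not name_changed:
--         name += grp_suffix
--     return name
-- ===== SOURCE B (Python) =====
-- def add_offsetGrp_suffix(name):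
--     suffixes = ('_GEO', '_FOL', '_IOM', '_INF', '_GRP', '_REF', '_BSP', '_BLD', '_CRV', '_JNT', '_LOC')
--     out = []
--     replaced = False
--     i = 0
--     n = len(name)
--     while i < n:
--         if name[i] == '_' and name[i:i + 4] in suffixes:
--             out.append('_GRP')
--             replaced = True
--             i += 4
--         else:
--             out.append(name[i])
--             i += 1
--     if not replaced:
--         out.append('_GRP')
--     return ''.join(out)
-- ===== Notes on version B (the rewrite author's own statement) =====
-- stated objective: alternative
-- what changed: Replaces the 11 sequential whole-string str.replace passes (plus a mutated flag) by a single left-to-right scan that matches any of the 4-char suffixes at each position, emitting '_GRP' and skipping 4 on a match; correctness relies on the suffixes being non-overlapping and '_GRP' idempotent.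
import Mathlib
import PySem

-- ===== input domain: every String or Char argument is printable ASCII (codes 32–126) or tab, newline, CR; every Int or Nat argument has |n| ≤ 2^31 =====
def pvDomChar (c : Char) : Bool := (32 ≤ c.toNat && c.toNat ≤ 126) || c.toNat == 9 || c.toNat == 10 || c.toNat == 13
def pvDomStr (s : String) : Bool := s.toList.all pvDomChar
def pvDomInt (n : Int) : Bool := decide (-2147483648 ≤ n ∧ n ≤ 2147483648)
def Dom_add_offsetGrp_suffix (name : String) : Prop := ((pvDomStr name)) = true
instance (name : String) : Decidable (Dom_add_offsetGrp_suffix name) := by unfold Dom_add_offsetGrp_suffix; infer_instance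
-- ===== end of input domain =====

-- B replaces A's 11 sequential whole-string `str.replace` passes (plus a name_changed flag) by a
-- single left-to-right scan that matches any 4-char suffix at each position ("alternative" objective).
-- Python strings are ported on their code points (List Char) via PySem.Chars, as PYSEM.md prescribes.

-- ===== PORT A =====
-- one body of A's `for suffix in suffixes` loop: state = (name, name_changed)
def aStep (st : List Char × Bool) (suffix : List Char) : List Char × Bool :=
  if PySem.Chars.isIn suffix st.1 then
    (PySem.Chars.replace st.1 suffix ['_', 'G', 'R', 'P'], true)
  else st

def add_offsetGrp_suffix (name : String) : String :=
  let suffixes : List (List Char) :=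
    [['_','G','E','O'], ['_','F','O','L'], ['_','I','O','M'], ['_','I','N','F'],
     ['_','G','R','P'], ['_','R','E','F'], ['_','B','S','P'], ['_','B','L','D'],
     ['_','C','R','V'], ['_','J','N','T'], ['_','L','O','C']]
  let st := suffixes.foldl aStep (name.toList, false)
  -- `if not name_changed: name += grp_suffix; return name`
  String.ofList (if st.2 = false then st.1 ++ ['_', 'G', 'R', 'P'] else st.1)

-- ===== PORT B =====
def bSuffixes : List (List Char) :=
  [['_','G','E','O'], ['_','F','O','L'], ['_','I','O','M'], ['_','I','N','F'],
   ['_','G','R','P'], ['_','R','E','F'], ['_','B','S','P'], ['_','B','L','D'],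
   ['_','C','R','V'], ['_','J','N','T'], ['_','L','O','C']]

-- B's while loop: one pass over the characters; returns (out pieces flattened, replaced flag)
def bScan : List Char → List Char × Bool
  | [] => ([], false)
  | c :: t =>
    if c = '_' ∧ (c :: t).take 4 ∈ bSuffixes then
      (['_', 'G', 'R', 'P'] ++ (bScan (t.drop 3)).1, true)
    else
      (c :: (bScan t).1, (bScan t).2)
termination_by s => s.length
decreasing_by
  all_goals simp only [List.length_drop, List.length_cons]
  all_goals omega

def add_offsetGrp_suffix_alt (name : String) : String :=
  let r := bScan name.toList
  String.ofList (if r.2 = false then r.1 ++ ['_', 'G', 'R', 'P'] else r.1)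

-- ===== PRECONDITION & SPEC =====
def Spec_add_offsetGrp_suffix (name : String) (out : String) : Prop := out = add_offsetGrp_suffix_alt name
instance (name : String) (out : String) : Decidable (Spec_add_offsetGrp_suffix name out) := by unfold Spec_add_offsetGrp_suffix; infer_instance

-- ===== CLAIM (what is proved, stated in full; the proofs are below) =====
def Claim_equal_add_offsetGrp_suffix : Prop := ∀ (name : String), Dom_add_offsetGrp_suffix name → Spec_add_offsetGrp_suffix name (add_offsetGrp_suffix name)

-- ===== LEMMAS AND PROOFS =====

-- the replacement string '_GRP'
def gL : List Char := ['_', 'G', 'R', 'P']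

-- structural-recursion form of PySem.Chars.replace (for a nonempty pattern)
def myRepl (old new : List Char) : List Char → List Char
  | [] => []
  | c :: t =>
    if old.isPrefixOf (c :: t) then new ++ myRepl old new (t.drop (old.length - 1))
    else c :: myRepl old new t
termination_by l => l.length
decreasing_by
  all_goals simp only [List.length_drop, List.length_cons]
  all_goals omega

lemma go_acc (old new : List Char) : ∀ (fuel : Nat) (l acc : List Char),
    PySem.Chars.replace.go old new fuel l acc = acc.reverse ++ PySem.Chars.replace.go old new fuel l [] := by
  intro fuel
  induction fuel with
  | zero => intro l acc; simp [PySem.Chars.replace.go]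
  | succ n ih =>
    intro l acc
    cases l with
    | nil => simp [PySem.Chars.replace.go]
    | cons c t =>
      simp only [PySem.Chars.replace.go]
      split
      · rw [ih (List.drop old.length (c :: t)) (new.reverse ++ acc),
            ih (List.drop old.length (c :: t)) (new.reverse ++ [])]
        simp
      · rw [ih t (c :: acc), ih t (c :: [])]
        simp

lemma go_fuel (old new : List Char) (hold : old ≠ []) : ∀ (fuel : Nat) (l : List Char), l.length ≤ fuel →
    PySem.Chars.replace.go old new fuel l [] = myRepl old new l := by
  intro fuel
  induction fuel with
  | zero =>
    intro l hl
    have : l = [] := List.eq_nil_of_length_eq_zero (Nat.le_zero.1 hl)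
    subst this
    simp [PySem.Chars.replace.go, myRepl]
  | succ n ih =>
    intro l hl
    cases l with
    | nil => simp [PySem.Chars.replace.go, myRepl]
    | cons c t =>
      have holdlen : 1 ≤ old.length := by
        cases old with
        | nil => exact absurd rfl hold
        | cons a b => simp
      simp only [PySem.Chars.replace.go]
      split
      · rename_i hpf
        rw [go_acc, ih]
        · rw [myRepl]
          rw [if_pos hpf]
          have hdrop : List.drop old.length (c :: t) = t.drop (old.length - 1) := by
            obtain ⟨k, hk⟩ : ∃ k, old.length = k + 1 := ⟨old.length - 1, by omega⟩
            rw [hk]; simp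
          rw [hdrop]; simp
        · simp only [List.length_drop, List.length_cons] at *
          omega
      · rename_i hpf
        rw [go_acc, ih t (by simp at hl; omega)]
        rw [myRepl, if_neg hpf]
        simp

lemma replace_eq_myRepl (old new s : List Char) (h : old ≠ []) :
    PySem.Chars.replace s old new = myRepl old new s := by
  rw [PySem.Chars.replace]
  rw [if_neg (by simp [List.isEmpty_iff, h])]
  exact go_fuel old new h s.length s le_rfl

lemma suff_shape : ∀ p ∈ bSuffixes, ∃ d1 d2 d3 : Char,
    p = ['_', d1, d2, d3] ∧ d1 ≠ '_' ∧ d2 ≠ '_' ∧ d3 ≠ '_' := by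
  intro p hp
  fin_cases hp <;> exact ⟨_, _, _, rfl, by decide, by decide, by decide⟩

lemma suff_len : ∀ p ∈ bSuffixes, p.length = 4 := by
  intro p hp; fin_cases hp <;> rfl

lemma suff_ne_nil : ∀ p ∈ bSuffixes, p ≠ [] := by
  intro p hp; fin_cases hp <;> simp

lemma gL_mem : gL ∈ bSuffixes := by simp [gL, bSuffixes]

lemma myRepl_cons_of_not_prefix (old new : List Char) (c : Char) (t : List Char)
    (h : ¬ old <+: c :: t) : myRepl old new (c :: t) = c :: myRepl old new t := by
  rw [myRepl, if_neg (by simpa [List.isPrefixOf_iff_prefix] using h)]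

lemma myRepl_block_self (p new t : List Char) (hp : p ∈ bSuffixes) :
    myRepl p new (p ++ t) = new ++ myRepl p new t := by
  obtain ⟨d1, d2, d3, rfl, -, -, -⟩ := suff_shape p hp
  simp only [List.cons_append, List.nil_append]
  rw [myRepl, if_pos (by
    rw [List.isPrefixOf_iff_prefix]
    exact List.cons_prefix_cons.2 ⟨rfl, List.cons_prefix_cons.2 ⟨rfl,
      List.cons_prefix_cons.2 ⟨rfl, List.cons_prefix_cons.2 ⟨rfl, List.nil_prefix⟩⟩⟩⟩)]
  simp

lemma repl_block (p q t : List Char) (hp : p ∈ bSuffixes) (hq : q ∈ bSuffixes) :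
    myRepl q gL (p ++ t) = (if q = p then gL else p) ++ myRepl q gL t := by
  by_cases hqp : q = p
  · subst hqp; rw [if_pos rfl]; exact myRepl_block_self q gL t hq
  · rw [if_neg hqp]
    obtain ⟨a, b, c, rfl, ha, hb, hc⟩ := suff_shape p hp
    obtain ⟨d, e, f, rfl, hd, he, hf⟩ := suff_shape q hq
    have h1 : ¬ ['_', d, e, f] <+: '_' :: a :: b :: c :: t := by
      intro hpre
      simp only [List.cons_prefix_cons] at hpre
      obtain ⟨-, hde, hef, hfc, -⟩ := hpre
      exact hqp (by rw [hde, hef, hfc])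
    have h2 : ¬ ['_', d, e, f] <+: a :: b :: c :: t := by
      intro hpre; simp only [List.cons_prefix_cons] at hpre; exact ha hpre.1.symm
    have h3 : ¬ ['_', d, e, f] <+: b :: c :: t := by
      intro hpre; simp only [List.cons_prefix_cons] at hpre; exact hb hpre.1.symm
    have h4 : ¬ ['_', d, e, f] <+: c :: t := by
      intro hpre; simp only [List.cons_prefix_cons] at hpre; exact hc hpre.1.symm
    simp only [List.cons_append, List.nil_append]
    rw [myRepl_cons_of_not_prefix _ _ _ _ h1, myRepl_cons_of_not_prefix _ _ _ _ h2,
        myRepl_cons_of_not_prefix _ _ _ _ h3, myRepl_cons_of_not_prefix _ _ _ _ h4]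

lemma myRepl_id (q s : List Char) (h : ¬ q <:+: s) : myRepl q gL s = s := by
  induction s with
  | nil => simp [myRepl]
  | cons c t ih =>
    rw [myRepl_cons_of_not_prefix _ _ _ _ (fun hp => h hp.isInfix),
        ih (fun hi => h (List.infix_cons hi))]

def foldR (qs : List (List Char)) (s : List Char) : List Char :=
  qs.foldl (fun s q => myRepl q gL s) s

lemma foldR_nil (qs : List (List Char)) : foldR qs [] = [] := by
  induction qs with
  | nil => rfl
  | cons q qs ih => simpa [foldR, myRepl] using ih

lemma aFold_eq (qs : List (List Char)) (hqs : ∀ q ∈ qs, q ∈ bSuffixes) :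
    ∀ (s : List Char) (b : Bool),
    qs.foldl aStep (s, b) = (foldR qs s, b || qs.any (fun q => PySem.Chars.isIn q s)) := by
  induction qs with
  | nil => intro s b; simp [foldR]
  | cons q qs ih =>
    intro s b
    have hqB := hqs q (by simp)
    have hrest : ∀ p ∈ qs, p ∈ bSuffixes := fun p hp => hqs p (by simp [hp])
    by_cases hin : PySem.Chars.isIn q s = true
    · have : aStep (s, b) q = (myRepl q gL s, true) := by
        simp [aStep, hin, replace_eq_myRepl _ _ _ (suff_ne_nil q hqB)]
        rfl
      rw [List.foldl_cons, this, ih hrest]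
      simp [foldR, hin]
    · have hnin : PySem.Chars.isIn q s = false := by simpa using hin
      have hninf : ¬ q <:+: s := (PySem.Chars.isIn_eq_false_iff q s).1 hnin
      have : aStep (s, b) q = (s, b) := by simp [aStep, hnin]
      rw [List.foldl_cons, this, ih hrest]
      simp [foldR, hnin, myRepl_id q s hninf]

lemma pre_nounderscore (q : List Char) (hq : q ∈ bSuffixes) :
    ∀ (ds : List Char), (∀ d ∈ ds, d ≠ '_') → ∀ t, ds <+: myRepl q gL t → ds <+: t := by
  intro ds
  induction ds with
  | nil => intro _ t _; exact List.nil_prefix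
  | cons d ds ih =>
    intro hd t hpre
    cases t with
    | nil => simp [myRepl] at hpre
    | cons a t2 =>
      by_cases hpf : q <+: a :: t2
      · have : myRepl q gL (a :: t2) = gL ++ myRepl q gL (t2.drop (q.length - 1)) := by
          rw [myRepl, if_pos (by simpa [List.isPrefixOf_iff_prefix] using hpf)]
        rw [this] at hpre
        have : d = '_' := (List.cons_prefix_cons.1 hpre).1
        exact absurd this (hd d (by simp))
      · rw [myRepl_cons_of_not_prefix _ _ _ _ hpf] at hpre
        obtain ⟨hda, hds⟩ := List.cons_prefix_cons.1 hpre
        exact List.cons_prefix_cons.2 ⟨hda, ih (fun x hx => hd x (by simp [hx])) t2 hds⟩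

lemma nmp (q q' : List Char) (hq : q ∈ bSuffixes) (hq' : q' ∈ bSuffixes) (c : Char) (t : List Char)
    (h : ¬ q' <+: c :: t) : ¬ q' <+: c :: myRepl q gL t := by
  obtain ⟨d1, d2, d3, rfl, h1, h2, h3⟩ := suff_shape q' hq'
  intro hp
  obtain ⟨hc, hrest⟩ := List.cons_prefix_cons.1 hp
  have : [d1, d2, d3] <+: t :=
    pre_nounderscore q hq [d1, d2, d3] (by intro d hd; simp at hd; rcases hd with rfl | rfl | rfl <;> assumption) t hrest
  exact h (List.cons_prefix_cons.2 ⟨hc, this⟩)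

lemma fold_cons (qs : List (List Char)) (hqs : ∀ q ∈ qs, q ∈ bSuffixes) :
    ∀ (c : Char) (t : List Char), (∀ q' ∈ bSuffixes, ¬ q' <+: c :: t) →
    foldR qs (c :: t) = c :: foldR qs t := by
  induction qs with
  | nil => intro c t _; rfl
  | cons q qs ih =>
    intro c t hnm
    have hqB := hqs q (by simp)
    have hrest : ∀ p ∈ qs, p ∈ bSuffixes := fun p hp => hqs p (by simp [hp])
    show foldR qs (myRepl q gL (c :: t)) = c :: foldR qs (myRepl q gL t)
    rw [myRepl_cons_of_not_prefix _ _ _ _ (hnm q hqB)]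
    exact ih hrest c (myRepl q gL t) (fun q' hq' => nmp q q' hqB hq' c t (hnm q' hq'))

lemma fold_block (qs : List (List Char)) (hqs : ∀ q ∈ qs, q ∈ bSuffixes) :
    ∀ (p : List Char), p ∈ bSuffixes → ∀ t,
    foldR qs (p ++ t) = (if p ∈ qs then gL else p) ++ foldR qs t := by
  induction qs with
  | nil => intro p _ t; simp [foldR]
  | cons q qs ih =>
    intro p hp t
    have hqB := hqs q (by simp)
    have hrest : ∀ x ∈ qs, x ∈ bSuffixes := fun x hx => hqs x (by simp [hx])
    show foldR qs (myRepl q gL (p ++ t)) = _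
    rw [repl_block p q t hp hqB]
    by_cases hqp : q = p
    · subst hqp
      rw [if_pos rfl, ih hrest gL gL_mem (myRepl q gL t)]
      simp [foldR]
    · rw [if_neg hqp, ih hrest p hp (myRepl q gL t)]
      have hmem : (p ∈ q :: qs) ↔ (p ∈ qs) := by
        simp only [List.mem_cons]
        exact or_iff_right (fun h => hqp h.symm)
      show _ = (if p ∈ q :: qs then gL else p) ++ foldR qs (myRepl q gL t)
      by_cases hpqs : p ∈ qs
      · rw [if_pos hpqs, if_pos (hmem.2 hpqs)]
      · rw [if_neg hpqs, if_neg (fun h => hpqs (hmem.1 h))]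

lemma take4_mem_len (s : List Char) (h : s.take 4 ∈ bSuffixes) : 4 ≤ s.length := by
  have := suff_len _ h
  simp [List.length_take] at this
  omega

lemma main_out : ∀ (n : Nat) (s : List Char), s.length ≤ n → foldR bSuffixes s = (bScan s).1 := by
  intro n
  induction n with
  | zero =>
    intro s hs
    have : s = [] := List.eq_nil_of_length_eq_zero (Nat.le_zero.1 hs)
    subst this; simp [foldR_nil, bScan]
  | succ n ih =>
    intro s hs
    cases s with
    | nil => simp [foldR_nil, bScan]
    | cons c t =>
      by_cases hc : c = '_' ∧ (c :: t).take 4 ∈ bSuffixes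
      · have hp : (c :: t).take 4 ∈ bSuffixes := hc.2
        have hlen : 4 ≤ (c :: t).length := take4_mem_len _ hp
        have hsplit : c :: t = (c :: t).take 4 ++ (c :: t).drop 4 := (List.take_append_drop 4 (c :: t)).symm
        have hfold : foldR bSuffixes (c :: t) = gL ++ foldR bSuffixes ((c :: t).drop 4) := by
          conv_lhs => rw [hsplit]
          rw [fold_block bSuffixes (fun q h => h) _ hp _, if_pos hp]
        rw [hfold, ih ((c :: t).drop 4) (by simp at hs ⊢; omega)]
        rw [bScan, if_pos hc]
        rfl
      · have hnm : ∀ q' ∈ bSuffixes, ¬ q' <+: c :: t := by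
          intro q' hq' hpre
          obtain ⟨d1, d2, d3, rfl, -, -, -⟩ := suff_shape q' hq'
          obtain ⟨hcq, -⟩ := List.cons_prefix_cons.1 hpre
          have htake : (c :: t).take 4 = ['_', d1, d2, d3] := by
            have h4 := List.prefix_iff_eq_take.1 hpre
            simpa using h4.symm
          exact hc ⟨hcq.symm, by rw [htake]; exact hq'⟩
        rw [fold_cons bSuffixes (fun q h => h) c t hnm, ih t (by simp at hs; omega)]
        rw [bScan, if_neg hc]

lemma main_flag : ∀ (n : Nat) (s : List Char), s.length ≤ n →
    bSuffixes.any (fun q => PySem.Chars.isIn q s) = (bScan s).2 := by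
  intro n
  induction n with
  | zero =>
    intro s hs
    have : s = [] := List.eq_nil_of_length_eq_zero (Nat.le_zero.1 hs)
    subst this
    simp [bScan]
    intro q hq
    rw [PySem.Chars.isIn_eq_false_iff]
    intro hinf
    have := List.IsInfix.length_le hinf
    rw [suff_len q hq] at this
    omega
  | succ n ih =>
    intro s hs
    cases s with
    | nil => exact ih [] (by simp)
    | cons c t =>
      by_cases hc : c = '_' ∧ (c :: t).take 4 ∈ bSuffixes
      · rw [bScan, if_pos hc]
        simp only
        rw [List.any_eq_true]
        refine ⟨(c :: t).take 4, hc.2, ?_⟩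
        rw [PySem.Chars.isIn_iff_infix]
        exact (List.take_prefix 4 (c :: t)).isInfix
      · rw [bScan, if_neg hc]
        simp only
        rw [← ih t (by simp at hs; omega)]
        have : ∀ q ∈ bSuffixes, PySem.Chars.isIn q (c :: t) = PySem.Chars.isIn q t := by
          intro q hq
          rcases h : PySem.Chars.isIn q t with _ | _
          · rw [PySem.Chars.isIn_eq_false_iff] at h ⊢
            intro hinf
            rcases List.infix_cons_iff.1 hinf with hpre | hinf2
            · obtain ⟨d1, d2, d3, rfl, -, -, -⟩ := suff_shape q hq
              obtain ⟨hcq, -⟩ := List.cons_prefix_cons.1 hpre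
              have htake : (c :: t).take 4 = ['_', d1, d2, d3] := by
                have h4 := List.prefix_iff_eq_take.1 hpre
                simpa using h4.symm
              exact hc ⟨hcq.symm, by rw [htake]; exact hq⟩
            · exact h hinf2
          · rw [PySem.Chars.isIn_iff_infix] at h ⊢
            exact List.infix_cons h
        rw [Bool.eq_iff_iff]
        simp only [List.any_eq_true]
        constructor
        · rintro ⟨q, hq, hv⟩; exact ⟨q, hq, by rw [← this q hq]; exact hv⟩
        · rintro ⟨q, hq, hv⟩; exact ⟨q, hq, by rw [this q hq]; exact hv⟩

-- ===== VERDICT (by name: the statement is the Claim_ definition above) =====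
theorem add_offsetGrp_suffix_spec : Claim_equal_add_offsetGrp_suffix := by
  intro name _
  unfold Spec_add_offsetGrp_suffix add_offsetGrp_suffix add_offsetGrp_suffix_alt
  show String.ofList
      (if (List.foldl aStep (name.toList, false) bSuffixes).2 = false then
        (List.foldl aStep (name.toList, false) bSuffixes).1 ++ gL
      else (List.foldl aStep (name.toList, false) bSuffixes).1) =
    String.ofList
      (if (bScan name.toList).2 = false then (bScan name.toList).1 ++ gL else (bScan name.toList).1)
  rw [aFold_eq bSuffixes (fun q h => h) name.toList false]
  rw [main_out name.toList.length name.toList le_rfl,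
      main_flag name.toList.length name.toList le_rfl]
  simp
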